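-- pv_equiv track=rewrite | github.com/Lil-Young/Programmers | Lv.2 귤 고르기.py | solution
-- ===== SOURCE A (Python) =====
-- from collections import Counter
--
-- def solution(k:str, tangerine:list):
--     answer = 0
--     a = list(set(tangerine))
--
--     # k보다 큰 귤의 수 제외하기
--     # Counter 패키지 사용하여 귤의 갯수 정렬하기
--     cnt = Counter(tangerine)
--     cnt = sorted(cnt.values(), reverse=True)
--
--     ## 리스트 컴프리헨션을 사용하여 귤의 갯수 정렬하기
--     # cnt = [tangerine.count(x) for x in a]
--     # cnt.sort(reverse=True)
--
--     ## dict의 values로 귤의 갯수 정렬하기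
--     # _dict = {}
--     # for i in range(len(a)):
--     #     _dict[a[i]] = tangerine.count(a[i])
--     # cnt = list(_dict.values())
--     # cnt.sort(reverse=True)
--     total = 0
--
--     for i in cnt:
--         total += i
--         answer += 1
--         if total >= k:
--             break
--
--     return answer
-- ===== SOURCE B (Python) =====
-- from collections import Counter
--
-- def solution(k, tangerine):
--     # bucket table: frequency value -> number of distinct kinds with that frequency;
--     # scan frequencies from the largest down, peeling one kind at a time (no sort).
--     buckets = Counter(Counter(tangerine).values())
--     total = 0
--     answer = 0
--     for f in range(max(buckets, default=0), 0, -1):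
--         for _ in range(buckets.get(f, 0)):
--             total += f
--             answer += 1
--             if total >= k:
--                 return answer
--     return answer
-- ===== Notes on version B (the rewrite author's own statement) =====
-- stated objective: alternative
-- what changed: Replaces sorting the Counter values with a frequency-bucket table (Counter of counts) scanned from the maximum frequency downwards, peeling one kind at a time until the running total reaches k.
import Mathlib
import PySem

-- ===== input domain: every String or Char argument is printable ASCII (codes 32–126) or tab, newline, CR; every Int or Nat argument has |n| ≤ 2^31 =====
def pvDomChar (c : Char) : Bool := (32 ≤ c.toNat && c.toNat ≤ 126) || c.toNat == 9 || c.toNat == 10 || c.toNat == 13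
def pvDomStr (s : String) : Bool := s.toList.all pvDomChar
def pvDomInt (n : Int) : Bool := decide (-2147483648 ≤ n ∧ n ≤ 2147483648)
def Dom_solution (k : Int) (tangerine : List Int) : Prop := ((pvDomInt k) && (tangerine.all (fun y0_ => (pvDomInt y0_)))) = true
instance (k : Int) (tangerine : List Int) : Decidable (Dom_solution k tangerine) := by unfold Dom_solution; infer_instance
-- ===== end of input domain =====

-- B replaces sorting the Counter values with a frequency-bucket table scanned from the
-- maximum frequency downwards, peeling one kind at a time (objective: alternative algorithm).


-- ===== PORT A =====
-- 'for i in cnt: total += i; answer += 1; if total >= k: break' then 'return answer'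
def solutionLoopA (k : Int) : List Int → Int → Int → Int
  | [], _, answer => answer
  | i :: rest, total, answer =>
    let total := total + i
    let answer := answer + 1
    if total ≥ k then answer else solutionLoopA k rest total answer

def solution (k : Int) (tangerine : List Int) : Int :=
  let _a := PySem.Set.ofList tangerine   -- a = list(set(tangerine)), never used afterwards
  let cnt := PySem.List.sorted (PySem.Dict.counter tangerine).values (fun x => x) true
  solutionLoopA k cnt 0 0

-- ===== PORT B =====
-- inner 'for _ in range(buckets.get(f, 0)): total += f; answer += 1; if total >= k: return answer'
def solutionInnerB (k f : Int) : Nat → Int → Int → Option Int × Int × Int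
  | 0, total, answer => (none, total, answer)
  | n + 1, total, answer =>
    let total := total + f
    let answer := answer + 1
    if total ≥ k then (some answer, total, answer) else solutionInnerB k f n total answer

-- outer 'for f in range(max(buckets, default=0), 0, -1): …'
def solutionOuterB (k : Int) (buckets : PySem.Dict Int Int) : List Int → Int → Int → Int
  | [], _, answer => answer
  | f :: rest, total, answer =>
    match solutionInnerB k f (buckets.getD f 0).toNat total answer with
    | (some r, _, _) => r
    | (none, total', answer') => solutionOuterB k buckets rest total' answer'

def solution_alt (k : Int) (tangerine : List Int) : Int :=
  let buckets := PySem.Dict.counter (PySem.Dict.counter tangerine).values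
  let maxf := PySem.List.maxD buckets.keys (fun x => x) 0
  solutionOuterB k buckets (PySem.List.pyRange maxf 0 (-1)) 0 0

-- ===== PRECONDITION & SPEC =====
def Spec_solution (k : Int) (tangerine : List Int) (out : Int) : Prop := out = solution_alt k tangerine
instance (k : Int) (tangerine : List Int) (out : Int) : Decidable (Spec_solution k tangerine out) := by unfold Spec_solution; infer_instance

-- ===== CLAIM (what is proved, stated in full; the proofs are below) =====
def Claim_equal_solution : Prop := ∀ (k : Int) (tangerine : List Int), Dom_solution k tangerine → Spec_solution k tangerine (solution k tangerine)

-- ===== LEMMAS AND PROOFS =====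

-- the inner counted loop of B behaves like A's loop run on a block of n copies of f
theorem innerB_eq_loopA (k f : Int) :
    ∀ (n : Nat) (total answer : Int) (rest : List Int),
      solutionLoopA k (List.replicate n f ++ rest) total answer =
        (match solutionInnerB k f n total answer with
         | (some r, _, _) => r
         | (none, t, a) => solutionLoopA k rest t a) := by
  intro n
  induction n with
  | zero => intro total answer rest; simp [solutionInnerB]
  | succ m ih =>
    intro total answer rest
    simp only [List.replicate_succ, List.cons_append, solutionLoopA, solutionInnerB]
    by_cases h : total + f ≥ k
    · simp [h]
    · simp [h, ih]

-- B's outer loop equals A's loop on the concatenation of the blocks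
theorem outerB_eq_loopA (k : Int) (buckets : PySem.Dict Int Int) :
    ∀ (freqs : List Int) (total answer : Int),
      solutionOuterB k buckets freqs total answer =
        solutionLoopA k (freqs.flatMap (fun f => List.replicate (buckets.getD f 0).toNat f)) total answer := by
  intro freqs
  induction freqs with
  | nil => intro total answer; simp [solutionOuterB, solutionLoopA]
  | cons f rest ih =>
    intro total answer
    simp only [List.flatMap_cons, solutionOuterB]
    rw [innerB_eq_loopA]
    cases h : solutionInnerB k f (buckets.getD f 0).toNat total answer with
    | mk o p =>
      cases o with
      | some r => simp
      | none => simp [ih]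

-- count of the blocks expansion
theorem count_flatMap_replicate (vs : List Int) (a : Int) :
    ∀ (freqs : List Int), freqs.Nodup →
      (freqs.flatMap (fun f => List.replicate (vs.count f) f)).count a =
        (if a ∈ freqs then vs.count a else 0) := by
  intro freqs
  induction freqs with
  | nil => simp
  | cons f rest ih =>
    intro hnd
    rcases List.nodup_cons.mp hnd with ⟨hf, hrest⟩
    simp only [List.flatMap_cons, List.count_append, List.count_replicate, ih hrest]
    by_cases h : a = f
    · subst h
      simp [hf]
    · simp [Ne.symm h, h]

-- the blocks expansion is a permutation of vs when freqs is nodup and covers vs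
theorem flatMap_replicate_perm (vs freqs : List Int) (hnd : freqs.Nodup)
    (hcov : ∀ v ∈ vs, v ∈ freqs) :
    (freqs.flatMap (fun f => List.replicate (vs.count f) f)).Perm vs := by
  rw [List.perm_iff_count]
  intro a
  rw [count_flatMap_replicate vs a freqs hnd]
  by_cases h : a ∈ freqs
  · simp [h]
  · simp only [h, if_false]
    exact (List.count_eq_zero.mpr (fun ha => h (hcov a ha))).symm

-- the blocks expansion is non-increasing when freqs is strictly decreasing
theorem flatMap_replicate_pairwise (vs : List Int) :
    ∀ (freqs : List Int), freqs.Pairwise (· > ·) →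
      (freqs.flatMap (fun f => List.replicate (vs.count f) f)).Pairwise (· ≥ ·) := by
  intro freqs
  induction freqs with
  | nil => simp
  | cons f rest ih =>
    intro hp
    rcases List.pairwise_cons.mp hp with ⟨hf, hrest⟩
    simp only [List.flatMap_cons]
    rw [List.pairwise_append]
    refine ⟨List.pairwise_replicate.mpr (Or.inr le_rfl), ih hrest, ?_⟩
    intro x hx y hy
    rcases (List.eq_of_mem_replicate hx) with rfl
    rcases List.mem_flatMap.mp hy with ⟨g, hg, hyg⟩
    rcases (List.eq_of_mem_replicate hyg) with rfl
    exact le_of_lt (hf _ hg)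

-- every value of Counter(tangerine) is positive
theorem counter_values_pos (tangerine : List Int) :
    ∀ v ∈ (PySem.Dict.counter tangerine).values, 0 < v := by
  intro v hv
  have : (PySem.Dict.counter tangerine).values =
      (PySem.Set.ofList tangerine).map (fun k => ((tangerine.count k : Nat) : Int)) := by
    show ((PySem.Dict.counter tangerine).items).map (·.2) = _
    rw [PySem.Dict.items_counter]
    simp
  rw [this] at hv
  rcases List.mem_map.mp hv with ⟨x, hx, rfl⟩
  have hx' : x ∈ tangerine := (PySem.Set.mem_ofList tangerine x).mp hx
  exact_mod_cast List.count_pos_iff.mpr hx'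

-- every value is at most maxD over the bucket keys
theorem counter_values_le_maxD (vs : List Int) :
    ∀ v ∈ vs, v ≤ PySem.List.maxD (PySem.Dict.counter vs).keys (fun x => x) 0 := by
  intro v hv
  rw [PySem.Dict.keys_counter]
  have hmem : v ∈ PySem.Set.ofList vs := (PySem.Set.mem_ofList vs v).mpr hv
  unfold PySem.List.maxD
  cases h : PySem.List.max? (PySem.Set.ofList vs) (fun x => x) with
  | none =>
    exact absurd ((PySem.List.max?_eq_none_iff _ _).mp h ▸ hmem) (List.not_mem_nil)
  | some m =>
    simpa using PySem.List.max?_isMax h v hmem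

-- the descending range is strictly decreasing and nodup
theorem pyRange_neg_one_pairwise_gt (a b : Int) :
    (PySem.List.pyRange a b (-1)).Pairwise (· > ·) := by
  rw [PySem.List.pyRange_neg_one_eq_reverse, List.pairwise_reverse]
  exact PySem.List.pairwise_lt_pyRange_one (b + 1) (a + 1)

theorem pyRange_neg_one_nodup (a b : Int) : (PySem.List.pyRange a b (-1)).Nodup := by
  rw [PySem.List.pyRange_neg_one_eq_reverse]
  exact List.nodup_reverse.mpr (PySem.List.nodup_pyRange_one (b + 1) (a + 1))

-- main expansion lemma: B's traversal sequence IS sorted(values, reverse=True)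
theorem expansion_eq_sorted (tangerine : List Int) :
    (PySem.List.pyRange
        (PySem.List.maxD (PySem.Dict.counter (PySem.Dict.counter tangerine).values).keys (fun x => x) 0)
        0 (-1)).flatMap
      (fun f => List.replicate ((PySem.Dict.counter (PySem.Dict.counter tangerine).values).getD f 0).toNat f) =
    PySem.List.sorted (PySem.Dict.counter tangerine).values (fun x => x) true := by
  set vs := (PySem.Dict.counter tangerine).values with hvs
  set M := PySem.List.maxD (PySem.Dict.counter vs).keys (fun x => x) 0 with hM
  have hgetD : ∀ f : Int, ((PySem.Dict.counter vs).getD f 0).toNat = vs.count f := by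
    intro f; rw [PySem.Dict.getD_counter]; exact Int.toNat_natCast _
  have hfun : (fun f => List.replicate ((PySem.Dict.counter vs).getD f 0).toNat f) =
      (fun f => List.replicate (vs.count f) f) := by
    funext f; rw [hgetD]
  rw [hfun]
  have hcov : ∀ v ∈ vs, v ∈ PySem.List.pyRange M 0 (-1) := by
    intro v hv
    rw [PySem.List.mem_pyRange_neg_one]
    exact ⟨counter_values_pos tangerine v hv, counter_values_le_maxD vs v hv⟩
  have hperm : ((PySem.List.pyRange M 0 (-1)).flatMap (fun f => List.replicate (vs.count f) f)).Perm vs :=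
    flatMap_replicate_perm vs _ (pyRange_neg_one_nodup M 0) hcov
  apply PySem.List.eq_of_perm_of_pairwise_le_of_injective (fun x : Int => -x) neg_injective
  · exact hperm.trans (PySem.List.sorted_perm vs (fun x => x) true).symm
  · have := flatMap_replicate_pairwise vs _ (pyRange_neg_one_pairwise_gt M 0)
    exact this.imp (by intro a b h; simpa using h)
  · have := PySem.List.sorted_pairwise_rev vs (fun x => x)
    exact this.imp (by intro a b h; simpa using h)

-- ===== VERDICT (by name: the statement is the Claim_ definition above) =====
theorem solution_spec : Claim_equal_solution := by
  intro k tangerine _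
  unfold Spec_solution solution solution_alt
  rw [outerB_eq_loopA, expansion_eq_sorted]
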